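-- pv_equiv track=rewrite | github.com/SantoSimone/Advent-of-Code | 2023/day_21.py | walk_grid
-- ===== SOURCE A (Python) =====
-- import collections
--
-- def walk_grid(start_pos, grid, max_steps):
--     visited = set()
--     queue = collections.deque([(0, start_pos)])
--     h = w = len(grid)
--
--     result = 0
--     while queue:
--         dist, pos = queue.popleft()
--
--         if pos in visited:
--             continue
--
--         visited.add(pos)
--
--         if dist % 2 == max_steps % 2:
--             # This path can be reached in the specified number of steps
--             result += 1
--
--         if dist >= max_steps:
--             continue
--
--         y, x = pos
--         for i, j in [(-1, 0), (1, 0), (0, 1), (0, -1)]: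
--             new_y = (y + i) % h
--             new_x = (x + j) % w
--             if grid.get((new_y, new_x), 1) == 0:
--                 queue.append((dist + 1, (new_y, new_x)))
--
--     return result
-- ===== SOURCE B (Python) =====
-- def walk_grid(start_pos, grid, max_steps):
--     # Level-synchronous BFS: frontier sets per distance, distance = loop index.
--     n = len(grid)
--     visited = {start_pos}
--     current = {start_pos}
--     result = 1 if max_steps % 2 == 0 else 0
--     for d in range(1, max_steps + 1):
--         nxt = set()
--         for (y, x) in current:
--             for dy, dx in ((-1, 0), (1, 0), (0, 1), (0, -1)):
--                 p = ((y + dy) % n, (x + dx) % n)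
--                 if p not in visited and grid.get(p, 1) == 0:
--                     nxt.add(p)
--         if not nxt:
--             break
--         visited |= nxt
--         if d % 2 == max_steps % 2:
--             result += len(nxt)
--         current = nxt
--     return result
-- ===== Notes on version B (the rewrite author's own statement) =====
-- stated objective: alternative
-- what changed: Replaced the (dist,pos)-deque BFS with per-node visited checks by a level-synchronous frontier-set BFS: distance is the loop index, each level's newly reached cells are counted at once, and the loop stops as soon as a frontier is empty.
import Mathlib
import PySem

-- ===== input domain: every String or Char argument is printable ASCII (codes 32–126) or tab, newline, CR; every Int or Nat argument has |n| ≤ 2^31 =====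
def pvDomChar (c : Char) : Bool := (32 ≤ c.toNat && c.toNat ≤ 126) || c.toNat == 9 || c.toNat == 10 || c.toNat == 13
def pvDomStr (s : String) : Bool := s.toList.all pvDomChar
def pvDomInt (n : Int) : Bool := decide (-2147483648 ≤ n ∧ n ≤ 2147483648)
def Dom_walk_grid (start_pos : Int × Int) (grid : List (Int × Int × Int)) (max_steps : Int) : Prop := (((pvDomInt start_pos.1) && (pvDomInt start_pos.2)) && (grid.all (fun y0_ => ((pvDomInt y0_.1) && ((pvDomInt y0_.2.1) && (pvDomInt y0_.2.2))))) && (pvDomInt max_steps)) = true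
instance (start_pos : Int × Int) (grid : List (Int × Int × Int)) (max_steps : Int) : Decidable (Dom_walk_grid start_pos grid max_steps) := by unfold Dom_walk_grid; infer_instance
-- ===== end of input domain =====

-- B replaces A's (dist,pos)-deque BFS by a level-synchronous frontier-set BFS (distance = loop
-- index, one count per level, stop on the first empty frontier); same return value on Pre_.

-- ===== PORT A =====

-- keys of the grid dict (used only by loopA's termination measure)
def pvKeys (grid : List (Int × Int × Int)) : List (Int × Int) :=
  grid.map (fun t => (t.1, t.2.1))

-- grid.get((p.1, p.2), 1)
def pvGetD (grid : List (Int × Int × Int)) (p : Int × Int) : Int :=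
  match grid.find? (fun t => t.1 == p.1 && t.2.1 == p.2) with
  | some t => t.2.2
  | none => 1

-- the literal list [(-1, 0), (1, 0), (0, 1), (0, -1)]
def pvDeltas : List (Int × Int) := [(-1, 0), (1, 0), (0, 1), (0, -1)]

-- A's inner for-loop: the queue entries appended for the four neighbours of pos
def pvPush (grid : List (Int × Int × Int)) (h : Int) (dist : Int) (pos : Int × Int) : List (Int × (Int × Int)) :=
  pvDeltas.foldl (fun acc ij =>
    let q := (PySem.Int.mod (pos.1 + ij.1) h, PySem.Int.mod (pos.2 + ij.2) h)
    if pvGetD grid q == 0 then acc ++ [(dist + 1, q)] else acc) []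

lemma pvGetD_zero_mem {grid : List (Int × Int × Int)} {p : Int × Int}
    (hz : pvGetD grid p = 0) : p ∈ pvKeys grid := by
  unfold pvGetD at hz
  cases hf : grid.find? (fun t => t.1 == p.1 && t.2.1 == p.2) with
  | none => rw [hf] at hz; simp at hz
  | some t =>
    rw [hf] at hz
    have hmem := List.mem_of_find?_eq_some hf
    have hp := List.find?_some hf
    simp only [Bool.and_eq_true, beq_iff_eq] at hp
    have : p = (t.1, t.2.1) := by
      obtain ⟨h1, h2⟩ := hp; cases p; simp_all
    rw [this]
    exact List.mem_map_of_mem hmem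

-- the passable neighbour positions of pos (pvPush without the distance tags)
def pvPushPos (grid : List (Int × Int × Int)) (h : Int) (pos : Int × Int) : List (Int × Int) :=
  (pvDeltas.map (fun ij => (PySem.Int.mod (pos.1 + ij.1) h, PySem.Int.mod (pos.2 + ij.2) h))).filter
    (fun q => pvGetD grid q == 0)

lemma pvPush_eq (grid : List (Int × Int × Int)) (h dist : Int) (pos : Int × Int) :
    pvPush grid h dist pos = (pvPushPos grid h pos).map (fun q => (dist + 1, q)) := by
  unfold pvPush pvPushPos pvDeltas
  simp only [List.foldl_cons, List.foldl_nil, List.map_cons, List.map_nil, List.filter_cons]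
  split_ifs <;> simp_all

lemma pvPush_pos_mem {grid : List (Int × Int × Int)} {h dist : Int} {pos : Int × Int} :
    ∀ e ∈ pvPush grid h dist pos, e.2 ∈ pvKeys grid := by
  intro e he
  rw [pvPush_eq] at he
  obtain ⟨q, hq, rfl⟩ := List.mem_map.mp he
  exact pvGetD_zero_mem (by simpa using (List.mem_filter.mp hq).2)

lemma pvPush_length_le {grid : List (Int × Int × Int)} {h dist : Int} {pos : Int × Int} :
    (pvPush grid h dist pos).length ≤ 4 := by
  unfold pvPush pvDeltas
  simp only [List.foldl_cons, List.foldl_nil]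
  split_ifs <;> simp

-- termination measure for A's while-loop
def pvMeasure (grid : List (Int × Int × Int)) (v : List (Int × Int)) (q : List (Int × (Int × Int))) : Nat :=
  5 * (((q.map Prod.snd).toFinset ∪ (pvKeys grid).toFinset) \ v.toFinset).card + q.length

lemma pvMeasure_lt_of_subset {grid : List (Int × Int × Int)} {v v' : List (Int × Int)}
    {q q' : List (Int × (Int × Int))}
    (hsub : ((q'.map Prod.snd).toFinset ∪ (pvKeys grid).toFinset) \ v'.toFinset
          ⊆ ((q.map Prod.snd).toFinset ∪ (pvKeys grid).toFinset) \ v.toFinset)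
    (hlen : q'.length < q.length) : pvMeasure grid v' q' < pvMeasure grid v q := by
  have := Finset.card_le_card hsub
  unfold pvMeasure; omega

-- A's while-loop over the deque
def loopA (grid : List (Int × Int × Int)) (h ms : Int) :
    List (Int × (Int × Int)) → PySem.Set (Int × Int) → Int → Int
  | [], _, r => r
  | (dist, pos) :: rest, v, r =>
    if PySem.Set.contains v pos then loopA grid h ms rest v r
    else
      let v' := PySem.Set.add v pos
      let r' := if PySem.Int.mod dist 2 == PySem.Int.mod ms 2 then r + 1 else r
      if ms ≤ dist then loopA grid h ms rest v' r'
      else loopA grid h ms (rest ++ pvPush grid h dist pos) v' r'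
termination_by q v _ => pvMeasure grid v q
decreasing_by
  · apply pvMeasure_lt_of_subset
    · apply Finset.sdiff_subset_sdiff _ (subset_refl _)
      apply Finset.union_subset_union_left
      simp only [List.map_cons, List.toFinset_cons]
      exact Finset.subset_insert _ _
    · simp
  · apply pvMeasure_lt_of_subset
    · apply Finset.sdiff_subset_sdiff
      · apply Finset.union_subset_union_left
        simp only [List.map_cons, List.toFinset_cons]
        exact Finset.subset_insert _ _
      · intro x hx
        simp only [List.mem_toFinset] at hx ⊢
        rw [PySem.Set.add_eq_ite]
        split_ifs <;> simp [hx]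
    · simp
  · -- expanding pop: pos leaves the unreached set, at most 4 entries join the queue
    have hvis : ¬ PySem.Set.contains v pos = true := by assumption
    have hposv : pos ∉ v := fun hm => hvis ((PySem.Set.contains_iff v pos).mpr hm)
    have hsub : (((rest ++ pvPush grid h dist pos).map Prod.snd).toFinset ∪ (pvKeys grid).toFinset)
          \ (PySem.Set.add v pos).toFinset
        ⊂ ((((dist, pos) :: rest).map Prod.snd).toFinset ∪ (pvKeys grid).toFinset) \ v.toFinset := by
      constructor
      · intro x hx
        simp only [Finset.mem_sdiff, Finset.mem_union, List.mem_toFinset] at hx ⊢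
        obtain ⟨hx1, hx2⟩ := hx
        refine ⟨?_, fun hxv => hx2 ?_⟩
        · rcases hx1 with hq | hk
          · rw [List.map_append, List.mem_append] at hq
            rcases hq with hq | hq
            · exact Or.inl (by simp only [List.map_cons, List.mem_cons]; exact Or.inr hq)
            · obtain ⟨e, he, rfl⟩ := List.mem_map.mp hq
              exact Or.inr (pvPush_pos_mem e he)
          · exact Or.inr hk
        · rw [PySem.Set.add_eq_ite]; split_ifs <;> simp [hxv]
      · intro hall
        have hpos : pos ∈ ((((dist, pos) :: rest).map Prod.snd).toFinset ∪ (pvKeys grid).toFinset) \ v.toFinset := by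
          simp [hposv]
        have := hall hpos
        simp only [Finset.mem_sdiff, List.mem_toFinset, PySem.Set.add_eq_ite] at this
        have h2 := this.2
        split_ifs at h2 <;> simp_all
    have hcard := Finset.card_lt_card hsub
    have hlen : (rest ++ pvPush grid h dist pos).length ≤ rest.length + 4 := by
      have := pvPush_length_le (grid := grid) (h := h) (dist := dist) (pos := pos)
      simp only [List.length_append]; omega
    unfold pvMeasure
    simp only [List.length_cons]
    omega

def walk_grid (start_pos : Int × Int) (grid : List (Int × Int × Int)) (max_steps : Int) : Int :=
  loopA grid (grid.length : Int) max_steps [(0, start_pos)] PySem.Set.empty 0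

-- ===== PORT B =====

-- B's level loop: k = number of remaining range(1, max_steps+1) iterations, d = its next value
def loopB (grid : List (Int × Int × Int)) (n ms : Int) :
    Nat → Int → PySem.Set (Int × Int) → PySem.Set (Int × Int) → Int → Int
  | 0, _, _, _, res => res
  | k + 1, d, visited, cur, res =>
    let nxt : PySem.Set (Int × Int) :=
      cur.foldl (fun acc p =>
        pvDeltas.foldl (fun acc2 ij =>
          let q := (PySem.Int.mod (p.1 + ij.1) n, PySem.Int.mod (p.2 + ij.2) n)
          if !PySem.Set.contains visited q && pvGetD grid q == 0
          then PySem.Set.add acc2 q else acc2) acc) PySem.Set.empty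
    if nxt = [] then res
    else
      let visited' := PySem.Set.union visited nxt
      let res' := if PySem.Int.mod d 2 == PySem.Int.mod ms 2 then res + PySem.Set.len nxt else res
      loopB grid n ms k (d + 1) visited' nxt res'

def walk_grid_alt (start_pos : Int × Int) (grid : List (Int × Int × Int)) (max_steps : Int) : Int :=
  let n : Int := (grid.length : Int)
  let res0 : Int := if PySem.Int.mod max_steps 2 == 0 then 1 else 0
  loopB grid n max_steps max_steps.toNat 1
    (PySem.Set.ofList [start_pos]) (PySem.Set.ofList [start_pos]) res0

-- ===== PRECONDITION & SPEC =====
-- Pre_ excludes (a) empty grids with max_steps > 0, where A raises ZeroDivisionError on '% 0'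
-- (B raises there too), and (b) association lists with duplicate keys, which do not represent a
-- Python dict argument (dict construction collapses them, changing len(grid) and the lookups).
def Pre_walk_grid (start_pos : Int × Int) (grid : List (Int × Int × Int)) (max_steps : Int) : Prop :=
  (pvKeys grid).Nodup ∧ (grid ≠ [] ∨ max_steps ≤ 0)
instance (start_pos : Int × Int) (grid : List (Int × Int × Int)) (max_steps : Int) : Decidable (Pre_walk_grid start_pos grid max_steps) := by unfold Pre_walk_grid; infer_instance

def pvWitness_walk_grid : (Int × Int) × (List (Int × Int × Int)) × Int :=
  ((0, 0), [(0, 0, 0), (0, 1, 0), (1, 0, 0), (1, 1, 1)], 3)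

def Spec_walk_grid (start_pos : Int × Int) (grid : List (Int × Int × Int)) (max_steps : Int) (out : Int) : Prop := out = walk_grid_alt start_pos grid max_steps
instance (start_pos : Int × Int) (grid : List (Int × Int × Int)) (max_steps : Int) (out : Int) : Decidable (Spec_walk_grid start_pos grid max_steps out) := by unfold Spec_walk_grid; infer_instance

-- ===== CLAIM (what is proved, stated in full; the proofs are below) =====
def Claim_equal_walk_grid : Prop := ∀ (start_pos : Int × Int) (grid : List (Int × Int × Int)) (max_steps : Int), Dom_walk_grid start_pos grid max_steps → Pre_walk_grid start_pos grid max_steps → Spec_walk_grid start_pos grid max_steps (walk_grid start_pos grid max_steps)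

-- ===== LEMMAS AND PROOFS =====

-- first occurrences of the members of a list that are not yet visited (A's per-level new cells)
def pvNew (v : PySem.Set (Int × Int)) : List (Int × Int) → List (Int × Int)
  | [] => []
  | p :: t => if PySem.Set.contains v p then pvNew v t else p :: pvNew (PySem.Set.add v p) t

lemma mem_pvNew {v : PySem.Set (Int × Int)} {M : List (Int × Int)} {x : Int × Int} :
    x ∈ pvNew v M ↔ x ∈ M ∧ x ∉ v := by
  induction M generalizing v with
  | nil => simp [pvNew]
  | cons p t ih =>
    unfold pvNew
    by_cases hp : p ∈ v
    · rw [if_pos ((PySem.Set.contains_iff v p).mpr hp)]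
      rw [ih]
      constructor
      · rintro ⟨h1, h2⟩; exact ⟨List.mem_cons_of_mem _ h1, h2⟩
      · rintro ⟨h1, h2⟩
        rcases List.mem_cons.mp h1 with rfl | h1
        · exact absurd hp h2
        · exact ⟨h1, h2⟩
    · rw [if_neg (fun hc => hp ((PySem.Set.contains_iff v p).mp hc))]
      simp only [List.mem_cons, ih, PySem.Set.mem_add]
      constructor
      · rintro (rfl | ⟨h1, h2⟩)
        · exact ⟨Or.inl rfl, hp⟩
        · exact ⟨Or.inr h1, fun hv => h2 (Or.inl hv)⟩
      · rintro ⟨rfl | h1, h2⟩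
        · exact Or.inl rfl
        · by_cases hxp : x = p
          · exact Or.inl hxp
          · exact Or.inr ⟨h1, fun hv => by rcases hv with hv | hv <;> [exact h2 hv; exact hxp hv]⟩

lemma pvNew_congr {v w : PySem.Set (Int × Int)} (hvw : ∀ x, x ∈ v ↔ x ∈ w) :
    ∀ M, pvNew v M = pvNew w M := by
  intro M
  induction M generalizing v w with
  | nil => rfl
  | cons p t ih =>
    unfold pvNew
    by_cases hp : p ∈ v
    · rw [if_pos ((PySem.Set.contains_iff v p).mpr hp),
        if_pos ((PySem.Set.contains_iff w p).mpr ((hvw p).mp hp))]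
      exact ih hvw
    · rw [if_neg (fun hc => hp ((PySem.Set.contains_iff v p).mp hc)),
        if_neg (fun hc => hp ((hvw p).mpr ((PySem.Set.contains_iff w p).mp hc)))]
      exact congrArg _ (ih (fun x => by simp [PySem.Set.mem_add, hvw x]))

-- the level lemma: one BFS level of A's deque loop, with N the already-queued next-level entries
lemma levelA (grid : List (Int × Int × Int)) (h ms d : Int) :
    ∀ (Aq N : List (Int × Int)) (v : PySem.Set (Int × Int)) (r : Int),
    loopA grid h ms (Aq.map (fun p => (d, p)) ++ N.map (fun p => (d + 1, p))) v r
      = loopA grid h ms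
          ((N ++ (if ms ≤ d then [] else (pvNew v Aq).flatMap (pvPushPos grid h))).map
            (fun p => (d + 1, p)))
          (PySem.Set.update v Aq)
          (r + (if PySem.Int.mod d 2 == PySem.Int.mod ms 2 then 1 else 0) * (pvNew v Aq).length) := by
  intro Aq
  induction Aq with
  | nil =>
    intro N v r
    simp [pvNew, PySem.Set.update]
  | cons p t ih =>
    intro N v r
    rw [List.map_cons, List.cons_append, loopA]
    by_cases hp : p ∈ v
    · rw [if_pos ((PySem.Set.contains_iff v p).mpr hp)]
      rw [ih N v r]
      have hnew2 : pvNew v (p :: t) = pvNew v t := by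
        unfold pvNew
        rw [if_pos ((PySem.Set.contains_iff v p).mpr hp)]
        exact pvNew.eq_def v t
      rw [hnew2]
      have : PySem.Set.update v (p :: t) = PySem.Set.update v t := by
        unfold PySem.Set.update
        rw [List.foldl_cons, PySem.Set.add_of_mem hp]
      rw [this]
    · rw [if_neg (fun hc => hp ((PySem.Set.contains_iff v p).mp hc))]
      have hupd : PySem.Set.update v (p :: t) = PySem.Set.update (PySem.Set.add v p) t := rfl
      have hnew : pvNew v (p :: t) = p :: pvNew (PySem.Set.add v p) t := by
        unfold pvNew
        rw [if_neg (fun hc => hp ((PySem.Set.contains_iff v p).mp hc))]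
        exact congrArg _ (pvNew.eq_def (PySem.Set.add v p) t)
      by_cases hms : ms ≤ d
      · rw [if_pos hms]
        rw [ih N (PySem.Set.add v p) _]
        rw [hupd, hnew]
        congr 1
        · simp [hms]
        · rw [List.length_cons]
          push_cast
          split_ifs <;> ring
      · rw [if_neg hms]
        have hq : (t.map (fun q => (d, q)) ++ N.map (fun q => (d + 1, q))) ++ pvPush grid h d p
            = t.map (fun q => (d, q)) ++ (N ++ pvPushPos grid h p).map (fun q => (d + 1, q)) := by
          rw [pvPush_eq, List.append_assoc, ← List.map_append]
        rw [hq, ih (N ++ pvPushPos grid h p) (PySem.Set.add v p) _]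
        rw [hupd, hnew]
        congr 1
        · simp [hms, List.flatMap_cons, List.append_assoc]
        · rw [List.length_cons]
          push_cast
          split_ifs <;> ring

lemma loopA_nil (grid : List (Int × Int × Int)) (h ms : Int) (v : PySem.Set (Int × Int)) (r : Int) :
    loopA grid h ms [] v r = r := by
  rw [loopA]

-- the filtered-neighbour fold with a fixed visited set, over any list
lemma fold_stepV (vis : PySem.Set (Int × Int)) :
    ∀ (M : List (Int × Int)) (acc : PySem.Set (Int × Int)),
    M.foldl (fun a q => if PySem.Set.contains vis q then a else PySem.Set.add a q) acc
      = acc ++ pvNew (acc ++ vis) M := by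
  intro M
  induction M with
  | nil => intro acc; simp [pvNew]
  | cons q t ih =>
    intro acc
    rw [List.foldl_cons]
    have hnew : pvNew (acc ++ vis) (q :: t)
        = if PySem.Set.contains (acc ++ vis) q then pvNew (acc ++ vis) t
          else q :: pvNew (PySem.Set.add (acc ++ vis) q) t := by
      rw [pvNew.eq_def]
    by_cases hqv : q ∈ vis
    · rw [if_pos ((PySem.Set.contains_iff vis q).mpr hqv), ih acc, hnew,
        if_pos ((PySem.Set.contains_iff _ q).mpr (List.mem_append.mpr (Or.inr hqv)))]
    · rw [if_neg (fun hc => hqv ((PySem.Set.contains_iff vis q).mp hc))]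
      by_cases hqa : q ∈ acc
      · rw [PySem.Set.add_of_mem hqa, ih acc, hnew,
          if_pos ((PySem.Set.contains_iff _ q).mpr (List.mem_append.mpr (Or.inl hqa)))]
      · have hqav : q ∉ acc ++ vis := by
          rw [List.mem_append]; rintro (hc | hc) <;> [exact hqa hc; exact hqv hc]
        rw [PySem.Set.add_of_not_mem hqa, ih (acc ++ [q]), hnew,
          if_neg (fun hc => hqav ((PySem.Set.contains_iff _ q).mp hc))]
        rw [List.append_assoc, List.singleton_append]
        congr 2
        apply pvNew_congr
        intro x
        rw [PySem.Set.add_of_not_mem hqav]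
        simp only [List.mem_append, List.mem_singleton]
        tauto

-- the inner for-loop over the four deltas, as a fold over the passable neighbours
lemma foldB_chain (grid : List (Int × Int × Int)) (n : Int) (vis : PySem.Set (Int × Int)) (p : Int × Int) :
    ∀ (ds : List (Int × Int)) (acc : PySem.Set (Int × Int)),
    ds.foldl (fun acc2 ij =>
        let q := (PySem.Int.mod (p.1 + ij.1) n, PySem.Int.mod (p.2 + ij.2) n)
        if !PySem.Set.contains vis q && pvGetD grid q == 0
        then PySem.Set.add acc2 q else acc2) acc
      = ((ds.map (fun ij => (PySem.Int.mod (p.1 + ij.1) n, PySem.Int.mod (p.2 + ij.2) n))).filter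
          (fun q => pvGetD grid q == 0)).foldl
          (fun a q => if PySem.Set.contains vis q then a else PySem.Set.add a q) acc := by
  intro ds
  induction ds with
  | nil => intro acc; rfl
  | cons ij t ih =>
    intro acc
    by_cases h2 : (pvGetD grid (PySem.Int.mod (p.1 + ij.1) n, PySem.Int.mod (p.2 + ij.2) n) == 0) = true
    · by_cases h1 : PySem.Set.contains vis (PySem.Int.mod (p.1 + ij.1) n, PySem.Int.mod (p.2 + ij.2) n) = true
      · simp only [List.foldl_cons, List.map_cons, List.filter_cons, h1, h2, Bool.not_true,
          Bool.false_and, Bool.false_eq_true, if_false, if_true]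
        exact ih acc
      · simp only [Bool.not_eq_true] at h1
        simp only [List.foldl_cons, List.map_cons, List.filter_cons, h1, h2, Bool.not_false,
          Bool.true_and, if_true]
        exact ih _
    · simp only [Bool.not_eq_true] at h2
      simp only [List.foldl_cons, List.map_cons, List.filter_cons, h2, Bool.and_false,
        Bool.false_eq_true, if_false]
      exact ih acc

-- B's nxt fold builds exactly the unvisited new cells of A's next-level list
lemma foldB_eq (grid : List (Int × Int × Int)) (n : Int) (vis : PySem.Set (Int × Int)) :
    ∀ (cur : List (Int × Int)),
    cur.foldl (fun acc p =>
        pvDeltas.foldl (fun acc2 ij =>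
          let q := (PySem.Int.mod (p.1 + ij.1) n, PySem.Int.mod (p.2 + ij.2) n)
          if !PySem.Set.contains vis q && pvGetD grid q == 0
          then PySem.Set.add acc2 q else acc2) acc) PySem.Set.empty
      = pvNew vis (cur.flatMap (pvPushPos grid n)) := by
  have houter : ∀ (cur : List (Int × Int)) (acc : PySem.Set (Int × Int)),
      cur.foldl (fun acc p =>
          pvDeltas.foldl (fun acc2 ij =>
            let q := (PySem.Int.mod (p.1 + ij.1) n, PySem.Int.mod (p.2 + ij.2) n)
            if !PySem.Set.contains vis q && pvGetD grid q == 0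
            then PySem.Set.add acc2 q else acc2) acc) acc
        = (cur.flatMap (pvPushPos grid n)).foldl
            (fun a q => if PySem.Set.contains vis q then a else PySem.Set.add a q) acc := by
    intro cur
    induction cur with
    | nil => intro acc; rfl
    | cons p t ih =>
      intro acc
      rw [List.foldl_cons, List.flatMap_cons, List.foldl_append, ih, foldB_chain]
      rfl
  intro cur
  rw [houter, fold_stepV]
  rfl

-- the bisimulation: A's deque loop from a level-shaped queue equals B's level loop
lemma core (grid : List (Int × Int × Int)) (h ms : Int) :
    ∀ (k : Nat) (d : Int) (L vA visB : List (Int × Int)) (r : Int),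
    (d + (k : Int) = ms ∨ (k = 0 ∧ ms ≤ d)) →
    (∀ x, x ∈ visB ↔ x ∈ vA ∨ x ∈ L) →
    loopA grid h ms (L.map (fun p => (d, p))) vA r
      = loopB grid h ms k (d + 1) visB (pvNew vA L)
          (r + (if PySem.Int.mod d 2 == PySem.Int.mod ms 2 then 1 else 0) * (pvNew vA L).length) := by
  intro k
  induction k with
  | zero =>
    intro d L vA visB r hk _
    have hms : ms ≤ d := by
      rcases hk with hk | hk
      · simp only [Nat.cast_zero, add_zero] at hk; omega
      · exact hk.2
    rw [show L.map (fun p => (d, p))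
          = L.map (fun p => (d, p)) ++ ([] : List (Int × Int)).map (fun p => (d + 1, p)) by simp]
    rw [levelA, if_pos hms]
    simp only [List.append_nil, List.map_nil]
    rw [loopA_nil]
    rfl
  | succ k ih =>
    intro d L vA visB r hk hvis
    have hd : d < ms := by
      rcases hk with hk | hk
      · push_cast at hk; omega
      · exact absurd hk.1 (Nat.succ_ne_zero k)
    rw [show L.map (fun p => (d, p))
          = L.map (fun p => (d, p)) ++ ([] : List (Int × Int)).map (fun p => (d + 1, p)) by simp]
    rw [levelA, if_neg (not_le.mpr hd)]
    simp only [List.map_nil, List.nil_append]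
    rw [loopB]
    have hnxt : (pvNew vA L).foldl (fun acc p =>
          pvDeltas.foldl (fun acc2 ij =>
            let q := (PySem.Int.mod (p.1 + ij.1) h, PySem.Int.mod (p.2 + ij.2) h)
            if !PySem.Set.contains visB q && pvGetD grid q == 0
            then PySem.Set.add acc2 q else acc2) acc) PySem.Set.empty
        = pvNew (PySem.Set.update vA L) ((pvNew vA L).flatMap (pvPushPos grid h)) := by
      rw [foldB_eq]
      apply pvNew_congr
      intro x
      rw [hvis x, PySem.Set.mem_update]
    rw [hnxt]
    by_cases hemp : pvNew (PySem.Set.update vA L) ((pvNew vA L).flatMap (pvPushPos grid h)) = []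
    · rw [if_pos hemp]
      rw [show ((pvNew vA L).flatMap (pvPushPos grid h)).map (fun p => (d + 1, p))
            = ((pvNew vA L).flatMap (pvPushPos grid h)).map (fun p => (d + 1, p))
              ++ ([] : List (Int × Int)).map (fun p => (d + 1 + 1, p)) by simp]
      rw [levelA, hemp]
      split_ifs <;> simp [loopA_nil]
    · rw [if_neg hemp]
      rw [ih (d + 1) ((pvNew vA L).flatMap (pvPushPos grid h)) (PySem.Set.update vA L)
          (PySem.Set.union visB (pvNew (PySem.Set.update vA L) ((pvNew vA L).flatMap (pvPushPos grid h))))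
          (r + (if PySem.Int.mod d 2 == PySem.Int.mod ms 2 then 1 else 0) * (pvNew vA L).length)
          (by rcases hk with hk | hk; · left; push_cast at hk ⊢; omega
              · exact absurd hk.1 (Nat.succ_ne_zero k))
          (by intro x
              rw [PySem.Set.mem_union, hvis x, mem_pvNew, PySem.Set.mem_update]
              tauto)]
      congr 1
      unfold PySem.Set.len
      split_ifs <;> push_cast <;> ring

-- ===== VERDICT (by name: the statement is the Claim_ definition above) =====
theorem walk_grid_spec : Claim_equal_walk_grid := by
  intro start_pos grid max_steps _ _
  unfold Spec_walk_grid walk_grid walk_grid_alt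
  have hstart : [((0 : Int), start_pos)] = [start_pos].map (fun p => ((0 : Int), p)) := rfl
  rw [hstart]
  have hnew1 : pvNew PySem.Set.empty [start_pos] = [start_pos] := rfl
  have hcore := core grid (grid.length : Int) max_steps max_steps.toNat 0 [start_pos]
    PySem.Set.empty [start_pos] 0 (by omega) (by intro x; simp [PySem.Set.empty])
  rw [hnew1] at hcore
  rw [hcore]
  have hofList : PySem.Set.ofList [start_pos] = [start_pos] := rfl
  rw [hofList, zero_add]
  congr 1
  · have hmod0 : PySem.Int.mod 0 2 = 0 := rfl
    rw [hmod0]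
    simp only [List.length_cons, List.length_nil, Nat.cast_one, mul_one, zero_add]
    have : ((0 : Int) == PySem.Int.mod max_steps 2) = (PySem.Int.mod max_steps 2 == 0) := by
      simp [beq_iff_eq, eq_comm]
    rw [this]
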